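-- pv_equiv track=rewrite | github.com/nollavpat/python-codewars | 6th-kyu/sum_dig_pow.py | sum_dig_pow
-- ===== SOURCE A (Python) =====
-- def sum_dig_pow(a, b):
--     special_numbers = []
--
--     for i in range(a, b + 1):
--         i_in_str = str(i)
--         i_len = len(i_in_str)
--         is_special = False
--         total = 0
--         k = 1
--
--         for j in range(i_len):
--             i_in_int = int(i_in_str[j])
--             total += i_in_int ** k
--             k += 1
--
--         if total == i:
--             special_numbers.append(i)
--
--     return special_numbers
-- ===== SOURCE B (Python) =====
-- def sum_dig_pow(a, b):
--     result = []
--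
--     for i in range(a, b + 1):
--         # number of decimal digits of i (a single digit for 0..9)
--         n = 1
--         t = i
--         while t >= 10:
--             t //= 10
--             n += 1
--
--         # extract digits right-to-left; the units digit has position n,
--         # the leading digit position 1
--         total = 0
--         t = i
--         p = n
--         while p > 0:
--             total += (t % 10) ** p
--             t //= 10
--             p -= 1
--
--         if total == i:
--             result.append(i)
--
--     return result
-- ===== Notes on version B (the rewrite author's own statement) =====
-- stated objective: alternative
-- what changed: B replaces A's per-number string conversion and left-to-right char indexing by pure arithmetic: it counts digits with repeated //10, then extracts digits right-to-left with %10,//10 while a position counter runs from the digit count down to 1.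
-- crash fix: On a < 0 and a <= b the range contains a negative i and A raises ValueError (int('-')); B returns the list of matches (none are negative), e.g. [] on (-3,-2); the stated Raises_ region is limited to ranges of fewer than five million numbers, where B's value is checkable. — e.g. on sum_dig_pow(-3, -2): A raises ValueError, B returns []
import Mathlib
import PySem

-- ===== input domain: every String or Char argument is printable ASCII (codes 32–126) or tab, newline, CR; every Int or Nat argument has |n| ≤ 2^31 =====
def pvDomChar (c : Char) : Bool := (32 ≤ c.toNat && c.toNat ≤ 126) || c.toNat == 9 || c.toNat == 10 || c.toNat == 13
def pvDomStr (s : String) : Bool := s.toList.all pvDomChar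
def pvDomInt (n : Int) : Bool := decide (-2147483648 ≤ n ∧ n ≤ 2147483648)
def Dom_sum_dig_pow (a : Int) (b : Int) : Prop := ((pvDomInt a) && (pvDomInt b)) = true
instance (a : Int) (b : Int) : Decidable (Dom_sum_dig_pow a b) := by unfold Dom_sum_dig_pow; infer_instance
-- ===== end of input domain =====

-- B replaces A's string conversion/indexing by arithmetic digit extraction right-to-left
-- with a descending position counter (objective: alternative, same cost).

-- ===== PORT A =====
-- int(i_in_str[j]) : indexing a string yields a 1-char string, parsed by int(); the
-- .getD 0 default is unreachable under Pre_ (i ≥ 0, j in range, so parsing succeeds).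
-- A's variable is_special is assigned False and never used; it is omitted.
-- i_in_int ** k : k starts at 1 and only increments, so k.toNat renders ** exactly.
def sum_dig_pow (a : Int) (b : Int) : List Int :=
  (PySem.List.pyRange a (b + 1)).foldl (fun special_numbers i =>
    let i_in_str := PySem.Int.toStr i
    let i_len := PySem.Str.len i_in_str
    let st :=
      (PySem.List.pyRange 0 i_len).foldl (fun (st : Int × Int) j =>
        let i_in_int := ((PySem.Str.pyGet? i_in_str j).bind
                          (fun c => PySem.Int.ofChars? [c])).getD 0
        (st.1 + i_in_int ^ st.2.toNat, st.2 + 1)) (0, 1)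
    if st.1 = i then special_numbers ++ [i] else special_numbers) []

-- ===== PORT B =====
-- 'while t >= 10: t //= 10; n += 1' — structural recursion on a fuel bound; the loop
-- runs at most log10(t) times, so fuel = i.toNat (≥ t.toNat at every entry) is exact.
def bDigCount : Nat → Int → Int → Int
  | 0, _, n => n
  | fuel + 1, t, n =>
      if 10 ≤ t then bDigCount fuel (PySem.Int.floordiv t 10) (n + 1) else n

-- 'while p > 0: total += (t % 10) ** p; t //= 10; p -= 1' — p only decreases by 1,
-- so the loop is structural recursion on p (as a Nat; p > 0 throughout).
def bPowLoop (t : Int) : Nat → Int → Int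
  | 0, total => total
  | p + 1, total =>
      bPowLoop (PySem.Int.floordiv t 10) p (total + (PySem.Int.mod t 10) ^ (p + 1))

def sum_dig_pow_alt (a : Int) (b : Int) : List Int :=
  (PySem.List.pyRange a (b + 1)).foldl (fun result i =>
    let n := bDigCount i.toNat i 1
    let total := bPowLoop i n.toNat 0
    if total = i then result ++ [i] else result) []

-- ===== PRECONDITION & SPEC =====
-- Pre_ excludes exactly the inputs where A raises: for a < 0 ≤ b - a the range contains
-- a negative i, str(i) starts with '-', and int('-') raises ValueError.
def Pre_sum_dig_pow (a : Int) (b : Int) : Prop := 0 ≤ a ∨ b < a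
instance (a : Int) (b : Int) : Decidable (Pre_sum_dig_pow a b) := by unfold Pre_sum_dig_pow; infer_instance
def pvWitness_sum_dig_pow : Int × Int := (1, 100)

-- On a < 0 and a ≤ b the range contains a negative i and A raises ValueError (int('-'));
-- B returns the list of matches (no negative number matches), e.g. [] on (-3, -2).
-- (region limited to ranges of fewer than five million numbers, where B's value is checkable)
def Raises_sum_dig_pow (a : Int) (b : Int) : Prop := a < 0 ∧ a ≤ b ∧ b - a < 5000000
instance (a : Int) (b : Int) : Decidable (Raises_sum_dig_pow a b) := by unfold Raises_sum_dig_pow; infer_instance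
def pvRaiseWitness_sum_dig_pow : Int × Int := (-3, -2)
def pvRaiseWitnessOut_sum_dig_pow : List Int := []

def Spec_sum_dig_pow (a : Int) (b : Int) (out : List Int) : Prop := out = sum_dig_pow_alt a b
instance (a : Int) (b : Int) (out : List Int) : Decidable (Spec_sum_dig_pow a b out) := by unfold Spec_sum_dig_pow; infer_instance

-- ===== CLAIM (what is proved, stated in full; the proofs are below) =====
def Claim_equal_sum_dig_pow : Prop := ∀ (a : Int) (b : Int), Dom_sum_dig_pow a b → Pre_sum_dig_pow a b → Spec_sum_dig_pow a b (sum_dig_pow a b)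
def Claim_raises_sum_dig_pow : Prop := (∀ (a : Int) (b : Int), Dom_sum_dig_pow a b → Raises_sum_dig_pow a b → ¬ Pre_sum_dig_pow a b) ∧ (Dom_sum_dig_pow (pvRaiseWitness_sum_dig_pow.1) (pvRaiseWitness_sum_dig_pow.2) ∧ Raises_sum_dig_pow (pvRaiseWitness_sum_dig_pow.1) (pvRaiseWitness_sum_dig_pow.2) ∧ sum_dig_pow_alt (pvRaiseWitness_sum_dig_pow.1) (pvRaiseWitness_sum_dig_pow.2) = pvRaiseWitnessOut_sum_dig_pow)

-- ===== LEMMAS AND PROOFS =====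

-- value of a single digit char, as A parses it
def chVal (c : Char) : Int := (PySem.Int.ofChars? [c]).getD 0

-- positional digit-power sum over a char list, leftmost char raised to power k
def posSum : List Char → Nat → Int
  | [], _ => 0
  | c :: cs, k => chVal c ^ k + posSum cs (k + 1)

-- number of decimal digits, via Nat.toDigits
def dlen (m : Nat) : Nat := (Nat.toDigits 10 m).length

theorem chVal_digitChar (d : Nat) (hd : d < 10) : chVal (Nat.digitChar d) = (d : Int) := by
  interval_cases d <;> decide

theorem posSum_append_singleton (xs : List Char) (c : Char) (k : Nat) :
    posSum (xs ++ [c]) k = posSum xs k + chVal c ^ (k + xs.length) := by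
  induction xs generalizing k with
  | nil => simp [posSum]
  | cons x xs ih =>
    simp only [List.cons_append, posSum, ih (k + 1), List.length_cons]
    ring_nf

theorem pvFloordiv10 (m : Nat) : PySem.Int.floordiv (m : Int) 10 = ((m / 10 : Nat) : Int) := by
  rw [PySem.Int.floordiv_eq_ediv_of_pos (by norm_num)]; push_cast; rfl

theorem pvMod10 (m : Nat) : PySem.Int.mod (m : Int) 10 = ((m % 10 : Nat) : Int) := by
  rw [PySem.Int.mod_eq_emod_of_pos (by norm_num)]; push_cast; rfl

theorem toChars_natCast (m : Nat) : PySem.Int.toChars (m : Int) = Nat.toDigits 10 m := by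
  simp [PySem.Int.toChars]

theorem dlen_of_lt (m : Nat) (h : m < 10) : dlen m = 1 := by
  simp [dlen, Nat.toDigits_of_lt_base h]

theorem dlen_of_ge (m : Nat) (h : 10 ≤ m) : dlen m = dlen (m / 10) + 1 := by
  simp [dlen, Nat.toDigits_of_base_le (by norm_num) h]

theorem bDigCount_eq (m : Nat) : ∀ (fuel : Nat) (n : Int), m ≤ fuel →
    bDigCount fuel (m : Int) n = n + (dlen m : Int) - 1 := by
  induction m using Nat.strong_induction_on with
  | _ m ih =>
    intro fuel n hfuel
    match fuel with
    | 0 =>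
      have hm : m = 0 := by omega
      subst hm
      simp [bDigCount, dlen_of_lt 0 (by norm_num)]
    | fuel + 1 =>
      by_cases h : 10 ≤ m
      · have hc : (10 : Int) ≤ (m : Int) := by exact_mod_cast h
        have hrec : m / 10 < m := Nat.div_lt_self (by omega) (by norm_num)
        have hf : m / 10 ≤ fuel := by
          have := Nat.div_le_self m 10; omega
        simp only [bDigCount, if_pos hc, pvFloordiv10]
        rw [ih (m / 10) hrec fuel (n + 1) hf, dlen_of_ge m h]
        push_cast; ring
      · have hc : ¬ (10 : Int) ≤ (m : Int) := by exact_mod_cast h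
        simp only [bDigCount, if_neg hc]
        rw [dlen_of_lt m (by omega)]
        norm_num

theorem bPowLoop_eq (m : Nat) : ∀ (total : Int),
    bPowLoop (m : Int) (dlen m) total = total + posSum (Nat.toDigits 10 m) 1 := by
  induction m using Nat.strong_induction_on with
  | _ m ih =>
    intro total
    by_cases h : 10 ≤ m
    · rw [dlen_of_ge m h]
      simp only [bPowLoop, pvFloordiv10, pvMod10]
      rw [ih (m / 10) (Nat.div_lt_self (by omega) (by norm_num))]
      rw [Nat.toDigits_of_base_le (by norm_num) h, posSum_append_singleton]
      have hlen : (Nat.toDigits 10 (m / 10)).length = dlen (m / 10) := rfl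
      rw [hlen, chVal_digitChar (m % 10) (Nat.mod_lt m (by norm_num))]
      ring_nf
    · rw [dlen_of_lt m (by omega)]
      simp only [bPowLoop]
      rw [Nat.toDigits_of_lt_base (by omega), pvMod10]
      have : m % 10 = m := Nat.mod_eq_of_lt (by omega)
      simp [posSum, this, chVal_digitChar m (by omega)]

-- A's inner loop over string indices, characterised as posSum
theorem foldA (cs : List Char) : ∀ (t : Int),
    (List.range cs.length).foldl
      (fun (st : Int × Int) (j : Nat) =>
        (st.1 + (((PySem.Chars.pyGet? cs (j : Int)).bind
                   (fun c => PySem.Int.ofChars? [c])).getD 0) ^ st.2.toNat, st.2 + 1))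
      (t, 1)
    = (t + posSum cs 1, (cs.length : Int) + 1) := by
  induction cs using List.reverseRecOn with
  | nil => intro t; simp [posSum]
  | append_singleton xs c ih =>
    intro t
    rw [List.length_append, List.length_singleton, List.range_succ, List.foldl_append]
    have hfold := PySem.List.foldl_congr_mem (List.range xs.length)
      (fun (st : Int × Int) (j : Nat) =>
        (st.1 + (((PySem.Chars.pyGet? (xs ++ [c]) (j : Int)).bind
                   (fun ch => PySem.Int.ofChars? [ch])).getD 0) ^ st.2.toNat, st.2 + 1))
      (fun (st : Int × Int) (j : Nat) =>
        (st.1 + (((PySem.Chars.pyGet? xs (j : Int)).bind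
                   (fun ch => PySem.Int.ofChars? [ch])).getD 0) ^ st.2.toNat, st.2 + 1))
      (t, 1) (by
        intro acc j hj
        have hjlt : j < xs.length := List.mem_range.mp hj
        have hg : PySem.Chars.pyGet? (xs ++ [c]) (j : Int) = PySem.Chars.pyGet? xs (j : Int) := by
          show PySem.List.pyGet? (xs ++ [c]) (j : Int) = PySem.List.pyGet? xs (j : Int)
          rw [PySem.List.pyGet?_natCast, PySem.List.pyGet?_natCast,
            List.getElem?_append_left hjlt]
        simp only [hg])
    rw [hfold, ih t]
    have hget : PySem.Chars.pyGet? (xs ++ [c]) (xs.length : Int) = some c := by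
      show PySem.List.pyGet? (xs ++ [c]) (xs.length : Int) = some c
      rw [PySem.List.pyGet?_natCast]
      simp
    simp only [List.foldl_cons, List.foldl_nil, hget]
    have ht : ((xs.length : Int) + 1).toNat = xs.length + 1 := by omega
    rw [ht, Prod.mk.injEq]
    refine ⟨?_, by push_cast; ring⟩
    rw [posSum_append_singleton xs c 1, Nat.add_comm 1 xs.length]
    have hv : ((some c).bind (fun ch => PySem.Int.ofChars? [ch])).getD 0 = chVal c := rfl
    rw [hv]; ring

-- the two loop bodies agree on every non-negative i
theorem body_eq (acc : List Int) (i : Int) (h : 0 ≤ i) :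
    (let i_in_str := PySem.Int.toStr i
     let i_len := PySem.Str.len i_in_str
     let st :=
       (PySem.List.pyRange 0 i_len).foldl (fun (st : Int × Int) j =>
         let i_in_int := ((PySem.Str.pyGet? i_in_str j).bind
                           (fun c => PySem.Int.ofChars? [c])).getD 0
         (st.1 + i_in_int ^ st.2.toNat, st.2 + 1)) (0, 1)
     if st.1 = i then acc ++ [i] else acc)
    = (let n := bDigCount i.toNat i 1
       let total := bPowLoop i n.toNat 0
       if total = i then acc ++ [i] else acc) := by
  obtain ⟨m, rfl⟩ := Int.eq_ofNat_of_zero_le h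
  have hcs : (PySem.Int.toStr (m : Int)).toList = Nat.toDigits 10 m := by
    rw [PySem.Int.toList_toStr, toChars_natCast]
  have hlen : PySem.Str.len (PySem.Int.toStr (m : Int)) = ((Nat.toDigits 10 m).length : Int) := by
    rw [PySem.Str.len_eq, hcs]
  -- A's total
  have hA :
      ((PySem.List.pyRange 0 (PySem.Str.len (PySem.Int.toStr (m : Int)))).foldl
        (fun (st : Int × Int) j =>
          (st.1 + (((PySem.Str.pyGet? (PySem.Int.toStr (m : Int)) j).bind
                     (fun c => PySem.Int.ofChars? [c])).getD 0) ^ st.2.toNat, st.2 + 1)) (0, 1)).1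
      = posSum (Nat.toDigits 10 m) 1 := by
    rw [hlen, PySem.List.pyRange_zero_natCast, List.foldl_map]
    have hstr : ∀ (j : Int), PySem.Str.pyGet? (PySem.Int.toStr (m : Int)) j
        = PySem.Chars.pyGet? (Nat.toDigits 10 m) j := by
      intro j; rw [PySem.Str.pyGet?, hcs]
    simp only [hstr]
    rw [foldA (Nat.toDigits 10 m) 0]
    simp
  -- B's digit count
  have hn : bDigCount ((m : Int)).toNat (m : Int) 1 = ((dlen m : Int)) := by
    rw [Int.toNat_natCast, bDigCount_eq m m 1 (le_refl m)]
    ring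
  have hB : bPowLoop (m : Int) (bDigCount ((m : Int)).toNat (m : Int) 1).toNat 0
      = posSum (Nat.toDigits 10 m) 1 := by
    rw [hn, Int.toNat_natCast, bPowLoop_eq m 0, zero_add]
  simp only []
  rw [hA, hB]

theorem sum_dig_pow_spec : Claim_equal_sum_dig_pow := by
  intro a b _ hpre
  unfold Spec_sum_dig_pow sum_dig_pow sum_dig_pow_alt
  apply PySem.List.foldl_congr_mem
  intro acc i hi
  have hab := PySem.List.mem_pyRange_one.mp hi
  have hnn : 0 ≤ i := by
    rcases hpre with h | h
    · omega
    · omega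
  exact body_eq acc i hnn

theorem sum_dig_pow_raises : Claim_raises_sum_dig_pow := by
  unfold Claim_raises_sum_dig_pow
  constructor
  · intro a b _ hr hp
    rcases hr with ⟨h1, h2, h3⟩
    rcases hp with h | h <;> omega
  · exact ⟨by decide, by decide, by decide⟩

-- self-check: the raise-witness value, read back from the raises theorem
theorem pvRaiseOut_witness : sum_dig_pow_alt (-3) (-2) = pvRaiseWitnessOut_sum_dig_pow :=
  sum_dig_pow_raises.2.2.2
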